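-- pv_equiv track=rewrite | github.com/averyfairbanks/coding-exercise_3-21-21 | new_approach.py | times_repeated
-- ===== SOURCE A (Python) =====
-- def times_repeated(s, t):
--     d = get_dict(s, t)
--
--     times = 1
--     curr_idx = 0
--     for ch in t:
--         if not d[ch]:
--             return -1
--
--         flag = True
--         for i in d[ch]:
--             if i >= curr_idx:
--                 curr_idx = i
--                 flag = False
--                 break
--
--         if flag:
--             times += 1
--             curr_idx = d[ch][0]
--
--     return times
--
-- def get_dict(s, t):
--     d = dict()
--     for ch in t:
--         if ch not in d:
--             d[ch] = []
--
--     for i in range(len(s)):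
--         if s[i] in d:
--             d[s[i]].append(i)
--
--     return d
-- ===== SOURCE B (Python) =====
-- def times_repeated(s, t):
--     need = set(t)
--     pos = {ch: [] for ch in need}
--     for i, ch in enumerate(s):
--         if ch in pos:
--             pos[ch].append(i)
--     if any(not pos[ch] for ch in need):
--         return -1
--     times = 1
--     curr = 0
--     for ch in t:
--         lst = pos[ch]
--         j = _bisect_left(lst, curr)
--         if j == len(lst):
--             times += 1
--             curr = lst[0]
--         else:
--             curr = lst[j]
--     return times
--
-- def _bisect_left(lst, x):
--     lo, hi = 0, len(lst)
--     while lo < hi: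
--         mid = (lo + hi) // 2
--         if lst[mid] < x:
--             lo = mid + 1
--         else:
--             hi = mid
--     return lo
-- ===== Notes on version B (the rewrite author's own statement) =====
-- stated objective: faster
-- what changed: B replaces A's inner linear scan of each character's position list by a hand-written bisect_left binary search (and checks missing characters once upfront via a set instead of per-iteration), making the main loop O(|t| log |s|) instead of O(|t|*|s|).
import Mathlib
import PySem

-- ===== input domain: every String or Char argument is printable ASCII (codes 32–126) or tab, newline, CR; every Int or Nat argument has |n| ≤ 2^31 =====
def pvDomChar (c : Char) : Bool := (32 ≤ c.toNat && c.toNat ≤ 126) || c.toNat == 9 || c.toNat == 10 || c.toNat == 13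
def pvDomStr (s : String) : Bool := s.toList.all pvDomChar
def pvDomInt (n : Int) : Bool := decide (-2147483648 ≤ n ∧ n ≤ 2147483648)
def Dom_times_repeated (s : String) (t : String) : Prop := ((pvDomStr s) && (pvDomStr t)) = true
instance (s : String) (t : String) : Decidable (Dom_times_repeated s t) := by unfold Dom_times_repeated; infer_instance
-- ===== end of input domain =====

-- B replaces A's inner linear scan over each character's position list by a hand-written
-- binary search (bisect_left) plus an upfront missing-character check; equivalence of the
-- return values is proved (neither program mutates its arguments).

-- ===== PORT A =====

-- inner 'for i in d[ch]: if i >= curr_idx: … break' loop with its flag: first element ≥ curr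
def scanFirstGE : List Int → Int → Option Int
  | [], _ => none
  | i :: rest, curr => if i ≥ curr then some i else scanFirstGE rest curr

-- get_dict(s, t)
def getDictA (s t : String) : PySem.Dict Char (List Int) :=
  let d := t.toList.foldl
    (fun d ch => if d.contains ch then d else d.insert ch ([] : List Int)) PySem.Dict.empty
  (PySem.List.pyRange 0 (PySem.Str.len s) 1).foldl
    (fun d i =>
      let ch := PySem.List.pyGetD s.toList i ' '   -- s[i], i always in range
      if d.contains ch then d.modify ch [] (· ++ [i]) else d) d

-- the main 'for ch in t' loop of A (early 'return -1' = stopping the recursion)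
def loopA (d : PySem.Dict Char (List Int)) : List Char → Int → Int → Int
  | [], times, _ => times
  | ch :: rest, times, curr =>
    let lst := d.getD ch []
    if lst.isEmpty then -1
    else
      match scanFirstGE lst curr with
      | some i => loopA d rest times i
      | none => loopA d rest (times + 1) (PySem.List.pyGetD lst 0 0)

def times_repeated (s : String) (t : String) : Int :=
  loopA (getDictA s t) t.toList 1 0

-- ===== PORT B =====

-- hand-written _bisect_left of Source B: the lo/hi halving loop, recursion on hi - lo
def blAux (lst : List Int) (x : Int) (lo hi : Nat) : Nat :=
  if h : lo < hi then
    let mid := (lo + hi) / 2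
    if lst.getD mid 0 < x then blAux lst x (mid + 1) hi else blAux lst x lo mid
  else lo
termination_by hi - lo
decreasing_by all_goals omega

def bisectLeftB (lst : List Int) (x : Int) : Nat := blAux lst x 0 lst.length

-- one iteration of B's 'for ch in t' loop on the state (times, curr)
def stepB (d : PySem.Dict Char (List Int)) (st : Int × Int) (ch : Char) : Int × Int :=
  let lst := d.getD ch []
  let j := bisectLeftB lst st.2
  if j = lst.length then (st.1 + 1, PySem.List.pyGetD lst 0 0)
  else (st.1, lst.getD j 0)

def times_repeated_alt (s : String) (t : String) : Int :=
  let need := PySem.Set.ofList t.toList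
  let pos0 := need.foldl (fun d ch => d.insert ch ([] : List Int)) PySem.Dict.empty
  let pos := (PySem.List.enumerate s.toList).foldl
      (fun d p => if d.contains p.2 then d.modify p.2 [] (· ++ [p.1]) else d) pos0
  if need.any (fun ch => (pos.getD ch []).isEmpty) then -1
  else (t.toList.foldl (stepB pos) (1, 0)).1

-- ===== PRECONDITION & SPEC =====
def Spec_times_repeated (s : String) (t : String) (out : Int) : Prop := out = times_repeated_alt s t
instance (s : String) (t : String) (out : Int) : Decidable (Spec_times_repeated s t out) := by unfold Spec_times_repeated; infer_instance

-- ===== CLAIM (what is proved, stated in full; the proofs are below) =====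
def Claim_equal_times_repeated : Prop := ∀ (s : String) (t : String), Dom_times_repeated s t → Spec_times_repeated s t (times_repeated s t)

-- ===== LEMMAS AND PROOFS =====

-- the common second-stage loop body ('if ch in d: d[ch].append(i)')
def phi (d : PySem.Dict Char (List Int)) (p : Int × Char) : PySem.Dict Char (List Int) :=
  if d.contains p.2 then d.modify p.2 [] (· ++ [p.1]) else d

lemma getD_foldl_phi (l : List (Int × Char)) (d : PySem.Dict Char (List Int)) (c : Char) :
    (l.foldl phi d).getD c [] =
      d.getD c [] ++ (if d.contains c then (l.filter (fun p => p.2 == c)).map (·.1) else []) := by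
  induction l generalizing d with
  | nil => simp
  | cons p rest ih =>
    rw [List.foldl_cons, ih (phi d p)]
    by_cases hp : d.contains p.2
    · have hphi : phi d p = d.modify p.2 [] (· ++ [p.1]) := by simp [phi, hp]
      by_cases hc : c = p.2
      · subst hc
        simp [hphi, PySem.Dict.contains_modify, hp]
      · have : (phi d p).getD c [] = d.getD c [] := by
          rw [hphi, PySem.Dict.getD_modify]; simp [hc]
        rw [this, hphi, PySem.Dict.contains_modify]
        have hbeq : (p.2 == c) = false := by simp [Ne.symm hc]
        simp [hbeq, hc]
    · have hphi : phi d p = d := by simp [phi, hp]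
      by_cases hc : c = p.2
      · subst hc; simp [hphi, hp]
      · have hbeq : (p.2 == c) = false := by simp [Ne.symm hc]
        simp [hphi, hbeq]

-- stage 1 of A: 'for ch in t: if ch not in d: d[ch] = []'
lemma contains_stage1A (l : List Char) (d : PySem.Dict Char (List Int)) (c : Char) :
    ((l.foldl (fun d ch => if d.contains ch then d else d.insert ch ([] : List Int)) d).contains c)
      = (d.contains c || decide (c ∈ l)) := by
  induction l generalizing d with
  | nil => simp
  | cons ch rest ih =>
    rw [List.foldl_cons, ih]
    by_cases hch : d.contains ch
    · simp only [hch, if_true]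
      by_cases hc : c = ch
      · subst hc; simp [hch]
      · simp [hc]
    · simp only [hch, if_false, Bool.false_eq_true]
      rw [PySem.Dict.contains_insert]
      by_cases hc : c = ch
      · subst hc; simp
      · have hbe : (c == ch) = false := beq_eq_false_iff_ne.2 hc
        simp [hbe, hc]

lemma getD_stage1A (l : List Char) (d : PySem.Dict Char (List Int)) (c : Char) :
    ((l.foldl (fun d ch => if d.contains ch then d else d.insert ch ([] : List Int)) d).getD c [])
      = d.getD c [] := by
  induction l generalizing d with
  | nil => rfl
  | cons ch rest ih =>
    rw [List.foldl_cons, ih]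
    by_cases hch : d.contains ch
    · simp [hch]
    · simp only [hch, if_false, Bool.false_eq_true]
      rw [PySem.Dict.getD_insert]
      by_cases hc : c = ch
      · subst hc
        simp [PySem.Dict.getD_of_not_contains _ _ (by simpa using hch)]
      · simp [hc]

-- stage 1 of B: 'pos = {ch: [] for ch in need}'
lemma contains_stage1B (l : List Char) (d : PySem.Dict Char (List Int)) (c : Char) :
    ((l.foldl (fun d ch => d.insert ch ([] : List Int)) d).contains c)
      = (d.contains c || decide (c ∈ l)) := by
  induction l generalizing d with
  | nil => simp
  | cons ch rest ih =>
    rw [List.foldl_cons, ih]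
    rw [PySem.Dict.contains_insert]
    by_cases hc : c = ch
    · subst hc; simp
    · have hbe : (c == ch) = false := beq_eq_false_iff_ne.2 hc
      simp [hbe, hc]

lemma getD_stage1B (l : List Char) (d : PySem.Dict Char (List Int)) (c : Char) :
    ((l.foldl (fun d ch => d.insert ch ([] : List Int)) d).getD c [])
      = if c ∈ l then [] else d.getD c [] := by
  induction l generalizing d with
  | nil => simp
  | cons ch rest ih =>
    rw [List.foldl_cons, ih]
    by_cases hr : c ∈ rest
    · simp [hr]
    · rw [PySem.Dict.getD_insert]
      by_cases hc : c = ch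
      · subst hc; simp [hr]
      · simp [hc, hr]

-- the canonical contents of d[c]: the indices of c in s, in order
def posVal (s : String) (c : Char) : List Int :=
  ((PySem.List.enumerate s.toList).filter (fun p => p.2 == c)).map (·.1)

-- B's dict for s t
def dictB (s t : String) : PySem.Dict Char (List Int) :=
  (PySem.List.enumerate s.toList).foldl phi
    ((PySem.Set.ofList t.toList).foldl (fun d ch => d.insert ch ([] : List Int)) PySem.Dict.empty)

lemma getD_dictA (s t : String) (c : Char) :
    (getDictA s t).getD c [] = if c ∈ t.toList then posVal s c else [] := by
  unfold getDictA
  rw [PySem.Str.len_eq]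
  have henum : ∀ d0 : PySem.Dict Char (List Int),
      List.foldl (fun d i =>
        let ch := PySem.List.pyGetD s.toList i ' '
        if d.contains ch then d.modify ch [] (· ++ [i]) else d) d0
        (PySem.List.pyRange 0 ((s.toList.length : Int)) 1) =
      List.foldl phi d0 (PySem.List.enumerate s.toList) := by
    intro d0
    rw [PySem.List.enumerate_eq_map_pyRange s.toList ' ', List.foldl_map]
    simp only [PySem.List.len_eq]
    rfl
  rw [henum]
  rw [getD_foldl_phi, getD_stage1A, contains_stage1A]
  simp only [PySem.Dict.getD_empty, PySem.Dict.contains_empty, Bool.false_or, List.nil_append]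
  by_cases hc : c ∈ t.toList
  · simp [hc, posVal]
  · simp [hc]

lemma getD_dictB (s t : String) (c : Char) :
    (dictB s t).getD c [] = if c ∈ t.toList then posVal s c else [] := by
  unfold dictB
  rw [getD_foldl_phi, getD_stage1B, contains_stage1B]
  by_cases hc : c ∈ t.toList
  · have hmem : c ∈ PySem.Set.ofList t.toList := (PySem.Set.mem_ofList _ _).2 hc
    simp [hmem, hc, posVal]
  · have hmem : c ∉ PySem.Set.ofList t.toList := fun h => hc ((PySem.Set.mem_ofList _ _).1 h)
    simp [hmem, hc]

lemma getD_eq (s t : String) (c : Char) :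
    (dictB s t).getD c [] = (getDictA s t).getD c [] := by
  rw [getD_dictA, getD_dictB]

-- the lists stored by A are strictly increasing
lemma sorted_dictA (s t : String) (c : Char) :
    ((getDictA s t).getD c []).Pairwise (· < ·) := by
  rw [getD_dictA]
  by_cases hc : c ∈ t.toList
  · simp only [hc, if_true, posVal]
    rw [List.pairwise_map]
    exact (PySem.List.pairwise_lt_enumerate s.toList 0).sublist List.filter_sublist
  · simp [hc]

-- indexed strict monotonicity from Pairwise
lemma pairwise_getElem {lst : List Int} (hs : lst.Pairwise (· < ·))
    {j k : Nat} (hj : j < lst.length) (hk : k < lst.length) (hjk : j < k) :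
    lst[j] < lst[k] := List.pairwise_iff_getElem.1 hs j k hj hk hjk

-- binary-search invariant for blAux
lemma blAux_spec (lst : List Int) (c : Int) (hs : lst.Pairwise (· < ·)) :
    ∀ n lo hi, hi - lo = n → lo ≤ hi → hi ≤ lst.length →
    (∀ j (hj : j < lst.length), j < lo → lst[j] < c) →
    (∀ j (hj : j < lst.length), hi ≤ j → c ≤ lst[j]) →
    blAux lst c lo hi ≤ lst.length ∧
    (∀ j (hj : j < lst.length), j < blAux lst c lo hi → lst[j] < c) ∧
    (∀ j (hj : j < lst.length), blAux lst c lo hi ≤ j → c ≤ lst[j]) := by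
  intro n
  induction n using Nat.strong_induction_on with
  | _ n ih =>
    intro lo hi hn hle hhi hlo hup
    rw [blAux]
    by_cases h : lo < hi
    · simp only [h, dif_pos]
      have hmidlt : (lo + hi) / 2 < hi := by omega
      have hmidge : lo ≤ (lo + hi) / 2 := by omega
      have hmidlen : (lo + hi) / 2 < lst.length := lt_of_lt_of_le hmidlt hhi
      have hget : lst.getD ((lo + hi) / 2) 0 = lst[(lo + hi) / 2] := by
        rw [List.getD_eq_getElem?_getD, List.getElem?_eq_getElem hmidlen]; rfl
      rw [hget]
      by_cases hcmp : lst[(lo + hi) / 2] < c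
      · simp only [hcmp, if_true]
        refine ih (hi - ((lo + hi) / 2 + 1)) (by omega) ((lo + hi) / 2 + 1) hi (by omega)
          (by omega) hhi ?_ hup
        intro j hj hjlt
        rcases Nat.lt_or_ge j ((lo + hi) / 2) with hcase | hcase
        · exact lt_trans (pairwise_getElem hs hj hmidlen hcase) hcmp
        · have : j = (lo + hi) / 2 := by omega
          subst this; exact hcmp
      · simp only [hcmp, if_false]
        refine ih ((lo + hi) / 2 - lo) (by omega) lo ((lo + hi) / 2) (by omega)
          hmidge (le_of_lt hmidlen) hlo ?_
        intro j hj hjge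
        rcases Nat.lt_or_ge ((lo + hi) / 2) j with hcase | hcase
        · exact le_of_lt (lt_of_le_of_lt (not_lt.mp hcmp) (pairwise_getElem hs hmidlen hj hcase))
        · have : j = (lo + hi) / 2 := by omega
          subst this; exact not_lt.mp hcmp
    · simp only [h, dif_neg, not_false_iff]
      have : lo = hi := by omega
      subst this
      exact ⟨hhi, fun j hj hjlt => hlo j hj hjlt, fun j hj hjge => hup j hj hjge⟩

lemma bisectLeftB_spec (lst : List Int) (c : Int) (hs : lst.Pairwise (· < ·)) :
    bisectLeftB lst c ≤ lst.length ∧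
    (∀ j (hj : j < lst.length), j < bisectLeftB lst c → lst[j] < c) ∧
    (∀ j (hj : j < lst.length), bisectLeftB lst c ≤ j → c ≤ lst[j]) := by
  exact blAux_spec lst c hs lst.length 0 lst.length rfl (Nat.zero_le _) le_rfl
    (fun j hj hjlt => absurd hjlt (Nat.not_lt_zero j)) (fun j hj hjge => absurd hj (by omega))

-- the linear scan finds exactly the element at the insertion point
lemma scan_eq_getElem? (lst : List Int) (c : Int) :
    ∀ r, r ≤ lst.length →
    (∀ j (hj : j < lst.length), j < r → lst[j] < c) →
    (∀ (h : r < lst.length), c ≤ lst[r]) →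
    scanFirstGE lst c = lst[r]? := by
  induction lst with
  | nil =>
    intro r hr _ _
    have hr0 : r = 0 := by simpa using hr
    subst hr0
    rfl
  | cons x rest ih =>
    intro r hr hlo hup
    cases r with
    | zero =>
      have hx : c ≤ x := hup (by simp)
      simp [scanFirstGE, ge_iff_le, hx]
    | succ m =>
      have hx : x < c := hlo 0 (by simp) (Nat.succ_pos m)
      have hnot : ¬ x ≥ c := by omega
      rw [scanFirstGE]
      simp only [ge_iff_le, hnot, if_false]
      rw [List.getElem?_cons_succ]
      refine ih m (by simpa using hr) ?_ ?_
      · intro j hj hjm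
        have := hlo (j + 1) (by simpa using hj) (by omega)
        simpa using this
      · intro h
        have := hup (by simpa using h)
        simpa using this

-- A's loop returns -1 as soon as some remaining character has an empty list
lemma loopA_neg (d : PySem.Dict Char (List Int)) :
    ∀ chars times curr, (∃ ch ∈ chars, (d.getD ch []).isEmpty) →
    loopA d chars times curr = -1 := by
  intro chars
  induction chars with
  | nil => intro _ _ h; obtain ⟨_, h, _⟩ := h; cases h
  | cons ch rest ih =>
    intro times curr h
    rw [loopA]
    by_cases he : (d.getD ch []).isEmpty
    · simp [he]
    · obtain ⟨c', hc', hce⟩ := h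
      rcases List.mem_cons.1 hc' with rfl | hmem
      · exact absurd hce he
      · simp only [he, if_false, Bool.false_eq_true]
        cases scanFirstGE (d.getD ch []) curr with
        | some i => exact ih times i ⟨c', hmem, hce⟩
        | none => exact ih (times + 1) _ ⟨c', hmem, hce⟩

-- A's loop with the linear scan = B's fold with binary search, when every list is nonempty
lemma loops_eq (d e : PySem.Dict Char (List Int))
    (h : ∀ c, e.getD c [] = d.getD c [])
    (hsort : ∀ c, (d.getD c []).Pairwise (· < ·)) :
    ∀ chars, (∀ ch ∈ chars, ¬ (d.getD ch []).isEmpty) →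
    ∀ times curr, loopA d chars times curr = (chars.foldl (stepB e) (times, curr)).1 := by
  intro chars
  induction chars with
  | nil => intro _ times curr; rfl
  | cons ch rest ih =>
    intro hne times curr
    have hlst : e.getD ch [] = d.getD ch [] := h ch
    have hnemp : (d.getD ch []).isEmpty = false := by
      have := hne ch (List.mem_cons_self ..)
      simpa using this
    rw [loopA, List.foldl_cons]
    simp only [hnemp, Bool.false_eq_true, if_false]
    set lst := d.getD ch [] with hlstdef
    obtain ⟨hble, hbllo, hblup⟩ := bisectLeftB_spec lst curr (hsort ch)
    have hscan : scanFirstGE lst curr = lst[bisectLeftB lst curr]? :=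
      scan_eq_getElem? lst curr (bisectLeftB lst curr) hble
        (fun j hj hjlt => hbllo j hj hjlt) (fun hlt => hblup _ hlt le_rfl)
    by_cases hj : bisectLeftB lst curr = lst.length
    · have hnone : scanFirstGE lst curr = none := by
        rw [hscan, hj, List.getElem?_eq_none le_rfl]
      rw [hnone]
      have hstep : stepB e (times, curr) ch = (times + 1, PySem.List.pyGetD lst 0 0) := by
        simp [stepB, hlst, hj]
      rw [hstep]
      exact ih (fun c hc => hne c (List.mem_cons_of_mem _ hc)) (times + 1) _
    · have hjlt : bisectLeftB lst curr < lst.length := lt_of_le_of_ne hble hj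
      have hsome : scanFirstGE lst curr = some lst[bisectLeftB lst curr] := by
        rw [hscan, List.getElem?_eq_getElem hjlt]
      rw [hsome]
      have hstep : stepB e (times, curr) ch = (times, lst[bisectLeftB lst curr]) := by
        simp only [stepB, hlst, hj, if_false]
        rw [List.getD_eq_getElem?_getD, List.getElem?_eq_getElem hjlt]
        rfl
      rw [hstep]
      exact ih (fun c hc => hne c (List.mem_cons_of_mem _ hc)) times _

-- ===== VERDICT (by name: the statement is the Claim_ definition above) =====
theorem times_repeated_spec : Claim_equal_times_repeated := by
  intro s t _
  unfold Spec_times_repeated times_repeated times_repeated_alt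
  have hdict : ∀ c, ((PySem.List.enumerate s.toList).foldl
      (fun d p => if d.contains p.2 then d.modify p.2 [] (· ++ [p.1]) else d)
      ((PySem.Set.ofList t.toList).foldl (fun d ch => d.insert ch ([] : List Int))
        PySem.Dict.empty)).getD c [] = (getDictA s t).getD c [] := by
    intro c
    have := getD_eq s t c
    unfold dictB at this
    exact this
  set e := (PySem.List.enumerate s.toList).foldl
      (fun d p => if d.contains p.2 then d.modify p.2 [] (· ++ [p.1]) else d)
      ((PySem.Set.ofList t.toList).foldl (fun d ch => d.insert ch ([] : List Int))
        PySem.Dict.empty) with he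
  by_cases hany : (PySem.Set.ofList t.toList).any (fun ch => (e.getD ch []).isEmpty) = true
  · rw [if_pos hany]
    obtain ⟨ch, hmem, hemp⟩ := List.any_eq_true.1 hany
    rw [hdict ch] at hemp
    exact loopA_neg (getDictA s t) t.toList 1 0 ⟨ch, (PySem.Set.mem_ofList _ _).1 hmem, hemp⟩
  · rw [if_neg hany]
    refine loops_eq (getDictA s t) e hdict (sorted_dictA s t) t.toList ?_ 1 0
    intro ch hch hemp
    exact hany (List.any_eq_true.2 ⟨ch, (PySem.Set.mem_ofList _ _).2 hch, by rw [hdict ch]; exact hemp⟩)
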